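-- pv_equiv track=rewrite | github.com/programmers-algorithm-study-team5/code-review | 황다경/2주차/2주차_크레인 인형뽑기.py | solution
-- ===== SOURCE A (Python) =====
-- from collections import deque
--
-- def solution(board, moves):
--     n = len(board)
--     columns = [deque() for _ in range(n)]
--
--     for j in range(n):
--         for i in range(n):
--             if board[i][j] != 0:
--                 columns[j].append(board[i][j])
--
--     basket = []
--     count = 0
--
--     for move in moves:
--         col_idx = move - 1
--         if columns[col_idx]:
--             doll = columns[col_idx].popleft()
--             if basket and basket[-1] == doll:
--                 basket.pop()
--                 count += 2
--             else:
--                 basket.append(doll)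
--
--     return count
-- ===== SOURCE B (Python) =====
-- def solution(board, moves):
--     # Lazy per-column pointers instead of pre-building filtered column deques.
--     n = len(board)
--     ptr = [0] * n
--     basket = []
--     count = 0
--     for move in moves:
--         c = move - 1
--         while ptr[c] < n and board[ptr[c]][c] == 0:
--             ptr[c] += 1
--         if ptr[c] < n:
--             doll = board[ptr[c]][c]
--             ptr[c] += 1
--             if basket and basket[-1] == doll:
--                 basket.pop()
--                 count += 2
--             else:
--                 basket.append(doll)
--     return count
-- ===== Notes on version B (the rewrite author's own statement) =====
-- stated objective: alternative
-- what changed: Instead of pre-building a filtered deque for every column, B keeps one integer pointer per column and lazily scans a column downward past zeros only when a move touches it, reading dolls directly from the board.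
-- outside the precondition, e.g. on solution([[1, 2, 7], [4, 2, 8]], [0, 0]): A returns 2, B returns 0
import Mathlib
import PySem

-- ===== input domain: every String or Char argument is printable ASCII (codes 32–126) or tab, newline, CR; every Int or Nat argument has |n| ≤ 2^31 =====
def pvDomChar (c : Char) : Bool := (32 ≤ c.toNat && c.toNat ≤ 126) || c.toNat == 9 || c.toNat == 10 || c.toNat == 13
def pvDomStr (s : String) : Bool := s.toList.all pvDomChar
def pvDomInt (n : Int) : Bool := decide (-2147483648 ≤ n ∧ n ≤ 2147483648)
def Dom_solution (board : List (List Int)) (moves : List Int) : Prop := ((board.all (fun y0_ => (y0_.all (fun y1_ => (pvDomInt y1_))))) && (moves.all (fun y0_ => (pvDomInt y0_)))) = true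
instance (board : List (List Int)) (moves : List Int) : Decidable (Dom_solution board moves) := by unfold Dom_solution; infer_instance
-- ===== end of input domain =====

-- B replaces A's eager per-column deque prebuild by lazy per-column pointers into the
-- board (same return value on Pre_; neither program mutates its arguments).
-- ===== PORT A =====
-- A: pre-build, per column, the deque of its nonzero cells top-down; then replay
-- the moves popping from those deques into the basket stack.
def solutionStepA (st : List (List Int) × List Int × Int) (move : Int) :
    List (List Int) × List Int × Int :=
  let colIdx := move - 1
  match PySem.List.pyGet? st.1 colIdx with
  | none => st            -- Python raises IndexError here; excluded by Pre_
  | some col =>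
    match col with
    | [] => st
    | doll :: rest =>
      let columns := PySem.List.pySetD st.1 colIdx rest
      if st.2.1.getLast? = some doll then
        (columns, st.2.1.dropLast, st.2.2 + 2)
      else
        (columns, st.2.1 ++ [doll], st.2.2)

def solution (board : List (List Int)) (moves : List Int) : Int :=
  let n : Int := board.length
  let columns : List (List Int) :=
    (PySem.List.pyRange 0 n 1).map (fun j =>
      (PySem.List.pyRange 0 n 1).foldl (fun col i =>
        if PySem.List.pyGetD (PySem.List.pyGetD board i []) j 0 ≠ 0 then
          col ++ [PySem.List.pyGetD (PySem.List.pyGetD board i []) j 0]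
        else col) [])
  (moves.foldl solutionStepA (columns, [], 0)).2.2

-- ===== PORT B =====
-- B: one pointer per column; on each move lazily advance that column's pointer
-- past zeros ('while ptr[c] < n and board[ptr[c]][c] == 0: ptr[c] += 1').
-- The fuel argument only bounds the while loop for totality (n+1 always suffices).
def solutionAdv (board : List (List Int)) (n : Int) (c : Int) :
    Nat → List Int → List Int
  | 0, ptr => ptr
  | fuel + 1, ptr =>
    match PySem.List.pyGet? ptr c with
    | none => ptr         -- Python raises IndexError here; excluded by Pre_
    | some p =>
      if p < n ∧ PySem.List.pyGetD (PySem.List.pyGetD board p []) c 1 = 0 then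
        solutionAdv board n c fuel (PySem.List.pySetD ptr c (p + 1))
      else ptr

def solutionStepB (board : List (List Int)) (n : Int)
    (st : List Int × List Int × Int) (move : Int) : List Int × List Int × Int :=
  let c := move - 1
  let ptr := solutionAdv board n c (board.length + 1) st.1
  match PySem.List.pyGet? ptr c with
  | none => (ptr, st.2)   -- Python raises IndexError here; excluded by Pre_
  | some p =>
    if p < n then
      let doll := PySem.List.pyGetD (PySem.List.pyGetD board p []) c 0
      let ptr' := PySem.List.pySetD ptr c (p + 1)
      if st.2.1.getLast? = some doll then
        (ptr', st.2.1.dropLast, st.2.2 + 2)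
      else
        (ptr', st.2.1 ++ [doll], st.2.2)
    else (ptr, st.2)

def solution_alt (board : List (List Int)) (moves : List Int) : Int :=
  let n : Int := board.length
  (moves.foldl (solutionStepB board n)
    (List.replicate board.length (0 : Int), [], 0)).2.2

-- ===== PRECONDITION & SPEC =====
-- Pre_ excludes (a) boards with a row shorter than len(board), on which A raises
-- IndexError while building columns; (b) moves outside [1-n, n], on which A raises
-- IndexError; and (c) rows longer than len(board) combined with a non-positive move,
-- where Python's negative-index wraparound makes the two programs read different
-- cells (a defensible-corner artefact, see cites).
def Pre_solution (board : List (List Int)) (moves : List Int) : Prop :=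
  (∀ row ∈ board, board.length ≤ row.length) ∧
  (∀ m ∈ moves, 1 - (board.length : Int) ≤ m ∧ m ≤ (board.length : Int)) ∧
  ((∀ row ∈ board, row.length = board.length) ∨ (∀ m ∈ moves, 1 ≤ m))
instance (board : List (List Int)) (moves : List Int) : Decidable (Pre_solution board moves) := by
  unfold Pre_solution; infer_instance

def pvWitness_solution : List (List Int) × List Int :=
  ([[0, 3], [2, 3]], [1, 2, 2, 0])

def Spec_solution (board : List (List Int)) (moves : List Int) (out : Int) : Prop := out = solution_alt board moves
instance (board : List (List Int)) (moves : List Int) (out : Int) : Decidable (Spec_solution board moves out) := by unfold Spec_solution; infer_instance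

-- ===== CLAIM (what is proved, stated in full; the proofs are below) =====
def Claim_equal_solution : Prop := ∀ (board : List (List Int)) (moves : List Int), Dom_solution board moves → Pre_solution board moves → Spec_solution board moves (solution board moves)

-- ===== LEMMAS AND PROOFS =====
def pvRes (n : Nat) (c : Int) : Nat := (c + (if c < 0 then (n:Int) else 0)).toNat
lemma pvIdx_eq (n : Nat) (c : Int) (h1 : -(n:Int) ≤ c) (h2 : c < n) :
    PySem.List.pyIdx? n c = some (pvRes n c) := by
  unfold PySem.List.pyIdx?
  split_ifs <;> simp [pvRes] <;> split_ifs <;> omega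
lemma pvRes_lt (n : Nat) (c : Int) (h1 : -(n:Int) ≤ c) (h2 : c < n) : pvRes n c < n := by
  unfold pvRes; split_ifs <;> omega
lemma pvGet_eq' {α : Type} (xs : List α) (c : Int) (h1 : -(xs.length:Int) ≤ c) (h2 : c < xs.length) :
    PySem.List.pyGet? xs c = some (xs[pvRes xs.length c]'(pvRes_lt _ _ h1 h2)) := by
  unfold PySem.List.pyGet?; rw [pvIdx_eq _ _ h1 h2]
  simp [List.getElem?_eq_getElem (pvRes_lt _ _ h1 h2)]
lemma pvSet_eq {α : Type} (xs : List α) (c : Int) (v : α) (h1 : -(xs.length:Int) ≤ c) (h2 : c < xs.length) :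
    PySem.List.pySetD xs c v = xs.set (pvRes xs.length c) v := by
  unfold PySem.List.pySetD PySem.List.pySet?; rw [pvIdx_eq _ _ h1 h2]; rfl
lemma pvGetD_eq {α : Type} (xs : List α) (c : Int) (d : α) (h1 : -(xs.length:Int) ≤ c) (h2 : c < xs.length) :
    PySem.List.pyGetD xs c d = xs[pvRes xs.length c]'(pvRes_lt _ _ h1 h2) := by
  unfold PySem.List.pyGetD; rw [pvGet_eq' _ _ h1 h2]; rfl
lemma pvSetSelf {α : Type} (l : List α) (i : Nat) (a : α) (hi : i < l.length) (hv : l[i] = a) :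
    l.set i a = l := by
  refine List.ext_getElem (by simp) ?_
  intro k h1 h2
  rcases eq_or_ne i k with rfl | hne
  · simpa using hv.symm
  · rw [List.getElem_set_ne hne]

def pvCol (board : List (List Int)) (j : Nat) : List Int := board.map (fun row => row.getD j 0)
def pvNZ : Int → Bool := fun v => !(v == 0)
lemma pvCol_length (board : List (List Int)) (j : Nat) : (pvCol board j).length = board.length := by
  simp [pvCol]
lemma pvCol_getElem (board : List (List Int)) (j p : Nat) (hp : p < board.length) :
    (pvCol board j)[p]'(by simp [pvCol_length, hp]) = (board[p]'hp).getD j 0 := by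
  simp [pvCol]

lemma pvCell (board : List (List Int)) (hge : ∀ row ∈ board, board.length ≤ row.length)
    (c : Int) (h1 : -(board.length:Int) ≤ c) (h2 : c < board.length)
    (hc0 : 0 ≤ c ∨ ∀ row ∈ board, row.length = board.length)
    (pn : Nat) (hp : pn < board.length) (d1 : List Int) (d2 : Int) :
    PySem.List.pyGetD (PySem.List.pyGetD board (pn : Int) d1) c d2
      = (pvCol board (pvRes board.length c))[pn]'(by simp [pvCol_length, hp]) := by
  have hrow : board.length ≤ board[pn].length := hge _ (List.getElem_mem hp)
  have hreseq : pvRes board[pn].length c = pvRes board.length c := by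
    rcases hc0 with h | h
    · unfold pvRes; rw [if_neg (by omega), if_neg (by omega)]
    · rw [h _ (List.getElem_mem hp)]
  have hblt : pvRes board.length c < board[pn].length :=
    lt_of_lt_of_le (pvRes_lt _ _ h1 h2) hrow
  have hb : PySem.List.pyGetD board (pn : Int) d1 = board[pn] := by
    rw [pvGetD_eq board (pn:Int) d1 (by omega) (by omega)]
    congr 1
  rw [hb, pvGetD_eq _ c d2 (by have := hrow; omega) (by have := hrow; omega)]
  rw [pvCol_getElem _ _ _ hp]
  rw [List.getD_eq_getElem _ _ hblt]
  congr 1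

def pvFirst (board : List (List Int)) (j p : Nat) : Nat :=
  p + (((pvCol board j).drop p).takeWhile (fun v => v == 0)).length

lemma pvAdv (board : List (List Int)) (hge : ∀ row ∈ board, board.length ≤ row.length)
    (c : Int) (h1 : -(board.length:Int) ≤ c) (h2 : c < board.length)
    (hc0 : 0 ≤ c ∨ ∀ row ∈ board, row.length = board.length) :
    ∀ (fuel : Nat) (ptr : List Int) (p : Nat), ptr.length = board.length →
      ptr.getD (pvRes board.length c) 0 = (p : Int) → p ≤ board.length →
      board.length - p < fuel →
      solutionAdv board (board.length : Int) c fuel ptr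
        = ptr.set (pvRes board.length c) (pvFirst board (pvRes board.length c) p : Int) := by
  intro fuel
  induction fuel with
  | zero => intro ptr p _ _ _ hf; omega
  | succ f ih =>
    intro ptr p hlen hget hple hf
    have hjlt : pvRes board.length c < board.length := pvRes_lt _ _ h1 h2
    have hjlt' : pvRes ptr.length c < ptr.length := by rw [hlen]; exact pvRes_lt _ _ h1 h2
    have hres : pvRes ptr.length c = pvRes board.length c := by rw [hlen]
    have hgetE : ptr[pvRes ptr.length c]'hjlt' = (p : Int) := by
      rw [← List.getD_eq_getElem _ _ hjlt', hres, hget]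
    have hjlt2 : pvRes board.length c < ptr.length := by rw [hlen]; exact hjlt
    have hgetB : ptr[pvRes board.length c]'hjlt2 = (p : Int) := by
      rw [← List.getD_eq_getElem _ _ hjlt2]; exact hget
    simp only [solutionAdv]
    rw [pvGet_eq' ptr c (by omega) (by omega), hgetE]
    dsimp only
    by_cases hpn : p < board.length
    · -- pointer still inside the column
      have hcell := pvCell board hge c h1 h2 hc0 p hpn [] 1
      have hdropC : (pvCol board (pvRes board.length c)).drop p
          = (pvCol board (pvRes board.length c))[p]'(by simp [pvCol_length, hpn])
            :: (pvCol board (pvRes board.length c)).drop (p+1) := by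
        exact List.drop_eq_getElem_cons (by simp [pvCol_length, hpn])
      by_cases hz : (pvCol board (pvRes board.length c))[p]'(by simp [pvCol_length, hpn]) = 0
      · -- zero cell: loop advances
        rw [if_pos (⟨by exact_mod_cast hpn, by rw [hcell, hz]⟩ : _ ∧ _)]
        rw [pvSet_eq ptr c _ (by omega) (by omega), hres]
        rw [ih (ptr.set (pvRes board.length c) ((p:Int)+1)) (p+1)
          (by simp [hlen])
          (by rw [List.getD_eq_getElem _ _ (by simp [hlen, hjlt])]
              rw [List.getElem_set_self]; push_cast; ring)
          (by omega) (by omega)]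
        rw [List.set_set]
        congr 2
        unfold pvFirst
        rw [hdropC, hz]
        simp
        omega
      · -- nonzero cell: loop stops here
        rw [if_neg (by rintro ⟨-, hc0⟩; rw [hcell] at hc0; exact hz hc0)]
        have : pvFirst board (pvRes board.length c) p = p := by
          unfold pvFirst
          rw [hdropC]
          simp [hz]
        rw [this]
        exact (pvSetSelf ptr (pvRes board.length c) ((p:Nat) : Int) hjlt2 hgetB).symm
    · -- pointer at the bottom: p = board.length
      have hpeq : p = board.length := by omega
      rw [if_neg (by rintro ⟨hlt, -⟩; exact hpn (by exact_mod_cast hlt))]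
      have : pvFirst board (pvRes board.length c) p = p := by
        unfold pvFirst
        rw [List.drop_eq_nil_of_le (by rw [pvCol_length]; omega)]
        simp
      rw [this]
      exact (pvSetSelf ptr (pvRes board.length c) ((p:Nat) : Int) hjlt2 hgetB).symm

lemma pvDropFirst {α : Type} (q : α → Bool) : ∀ (s : List α),
    s.drop (s.takeWhile q).length = s.dropWhile q
  | [] => by simp
  | a :: t => by
    by_cases h : q a
    · simp [h, pvDropFirst q t]
    · simp [h]

lemma pvGetDSetSelf {α : Type} (l : List α) (i : Nat) (v d : α) (h : i < l.length) :
    (l.set i v).getD i d = v := by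
  rw [List.getD_eq_getElem _ _ (by simp [h])]
  exact List.getElem_set_self _
lemma pvGetDSetNe {α : Type} (l : List α) (i i' : Nat) (v d : α) (h : i ≠ i') :
    (l.set i v).getD i' d = l.getD i' d := by
  by_cases h' : i' < l.length
  · rw [List.getD_eq_getElem _ _ (by simp [h']), List.getD_eq_getElem _ _ h',
      List.getElem_set_ne h]
  · rw [List.getD_eq_default _ _ (by simp; omega), List.getD_eq_default _ _ (by omega)]

def pvInv (board : List (List Int)) (stA : List (List Int) × List Int × Int)
    (stB : List Int × List Int × Int) : Prop :=
  stA.2 = stB.2 ∧ stA.1.length = board.length ∧ stB.1.length = board.length ∧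
  ∀ j, j < board.length → ∃ p : Nat, p ≤ board.length ∧ stB.1.getD j 0 = (p : Int) ∧
    stA.1.getD j [] = ((pvCol board j).drop p).filter pvNZ

lemma pvStep (board : List (List Int)) (hge : ∀ row ∈ board, board.length ≤ row.length)
    (m : Int) (hm1 : 1 - (board.length:Int) ≤ m) (hm2 : m ≤ (board.length:Int))
    (hc0 : 0 ≤ m - 1 ∨ ∀ row ∈ board, row.length = board.length)
    (stA : List (List Int) × List Int × Int) (stB : List Int × List Int × Int)
    (hinv : pvInv board stA stB) :
    pvInv board (solutionStepA stA m) (solutionStepB board (board.length:Int) stB m) := by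
  obtain ⟨hbk, hlA, hlB, hcols⟩ := hinv
  have hc1 : -(board.length:Int) ≤ m - 1 := by omega
  have hc2 : m - 1 < (board.length:Int) := by omega
  have hj : pvRes board.length (m-1) < board.length := pvRes_lt _ _ hc1 hc2
  obtain ⟨p, hpn, hptr, hcolv⟩ := hcols _ hj
  have hadv := pvAdv board hge (m-1) hc1 hc2 hc0 (board.length+1) stB.1 p hlB hptr hpn (by omega)
  -- abbreviations
  have hq_def : pvFirst board (pvRes board.length (m-1)) p
      = p + (((pvCol board (pvRes board.length (m-1))).drop p).takeWhile (fun v => v == 0)).length := rfl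
  have hsplit : ((pvCol board (pvRes board.length (m-1))).drop p).takeWhile (fun v => v == 0)
      ++ ((pvCol board (pvRes board.length (m-1))).drop p).dropWhile (fun v => v == 0)
      = (pvCol board (pvRes board.length (m-1))).drop p := List.takeWhile_append_dropWhile
  have hslen : ((pvCol board (pvRes board.length (m-1))).drop p).length = board.length - p := by
    simp [pvCol_length]
  have hdq : (pvCol board (pvRes board.length (m-1))).drop (pvFirst board (pvRes board.length (m-1)) p)
      = ((pvCol board (pvRes board.length (m-1))).drop p).dropWhile (fun v => v == 0) := by
    rw [hq_def, ← List.drop_drop, pvDropFirst]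
  have hfil : ((pvCol board (pvRes board.length (m-1))).drop p).filter pvNZ
      = (((pvCol board (pvRes board.length (m-1))).drop p).dropWhile (fun v => v == 0)).filter pvNZ := by
    conv_lhs => rw [← hsplit]
    rw [List.filter_append, List.filter_eq_nil_iff.2 ?_, List.nil_append]
    intro a ha
    have := List.mem_takeWhile_imp ha
    simp [pvNZ] at this ⊢
    exact this
  have hql : pvFirst board (pvRes board.length (m-1)) p ≤ board.length := by
    have h1 := congrArg List.length hsplit
    rw [List.length_append, hslen] at h1
    rw [hq_def]; omega
  -- unfold the two steps
  simp only [solutionStepA, solutionStepB]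
  rw [hadv]
  have hlB2 : (stB.1.set (pvRes board.length (m-1)) ((pvFirst board (pvRes board.length (m-1)) p : Nat) : Int)).length = board.length := by
    simp [hlB]
  rw [pvGet_eq' (stB.1.set (pvRes board.length (m-1)) ((pvFirst board (pvRes board.length (m-1)) p : Nat) : Int)) (m-1) (by rw [hlB2]; omega) (by rw [hlB2]; exact_mod_cast hc2)]
  rw [pvGet_eq' stA.1 (m-1) (by rw [hlA]; omega) (by rw [hlA]; exact_mod_cast hc2)]
  have hresB : pvRes (stB.1.set (pvRes board.length (m-1)) ((pvFirst board (pvRes board.length (m-1)) p : Nat) : Int)).length (m-1) = pvRes board.length (m-1) := by rw [hlB2]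
  have hresA : pvRes stA.1.length (m-1) = pvRes board.length (m-1) := by rw [hlA]
  have hgetB : (stB.1.set (pvRes board.length (m-1)) ((pvFirst board (pvRes board.length (m-1)) p : Nat) : Int))[pvRes (stB.1.set (pvRes board.length (m-1)) ((pvFirst board (pvRes board.length (m-1)) p : Nat) : Int)).length (m-1)]'(by rw [hlB2] at *; exact hresB ▸ (by rw [hlB2]; exact hj)) = ((pvFirst board (pvRes board.length (m-1)) p : Nat) : Int) := by
    rw [← List.getD_eq_getElem _ 0, hresB, pvGetDSetSelf _ _ _ _ (by rw [hlB]; exact hj)]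
  have hgetA : stA.1[pvRes stA.1.length (m-1)]'(by rw [hresA, hlA]; exact hj)
      = ((pvCol board (pvRes board.length (m-1))).drop p).filter pvNZ := by
    rw [← List.getD_eq_getElem _ [], hresA, hcolv]
  rw [hgetB, hgetA]
  dsimp only
  rw [hfil]
  rcases hr : List.dropWhile (fun v => v == 0) (List.drop p (pvCol board (pvRes board.length (m-1)))) with _ | ⟨d, r'⟩
  · -- the column is exhausted: both sides leave basket and count untouched
    have h2 := congrArg List.length hsplit
    rw [List.length_append, hr, List.length_nil, hslen] at h2
    have hqn : pvFirst board (pvRes board.length (m-1)) p = board.length := by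
      rw [hq_def]; omega
    have hnot : ¬(((pvFirst board (pvRes board.length (m-1)) p : Nat) : Int) < (board.length : Int)) := by
      rw [hqn]; simp
    rw [if_neg hnot]
    simp only [List.filter_nil]
    refine ⟨hbk, hlA, by simp [hlB], ?_⟩
    intro j' hj'
    by_cases hjj : j' = pvRes board.length (m-1)
    · subst hjj
      refine ⟨board.length, le_refl _, ?_, ?_⟩
      · rw [pvGetDSetSelf _ _ _ _ (by rw [hlB]; exact hj), hqn]
      · rw [hcolv, hfil, hr, List.drop_eq_nil_of_le (by rw [pvCol_length])]
    · obtain ⟨p', hp'1, hp'2, hp'3⟩ := hcols j' hj'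
      exact ⟨p', hp'1, by rw [pvGetDSetNe _ _ _ _ _ (fun h => hjj h.symm)]; exact hp'2, hp'3⟩
  · -- a doll is found
    have hdnz : pvNZ d = true := by
      have h := List.head_dropWhile_not (fun v => (v == 0))
        (l := List.drop p (pvCol board (pvRes board.length (m-1)))) (by rw [hr]; simp)
      simp only [hr] at h
      simp at h
      simp [pvNZ, h]
    have h2 := congrArg List.length hsplit
    rw [List.length_append, hr, List.length_cons, hslen] at h2
    have hqlt : pvFirst board (pvRes board.length (m-1)) p < board.length := by
      rw [hq_def]; omega
    have hdqr : List.drop (pvFirst board (pvRes board.length (m-1)) p)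
        (pvCol board (pvRes board.length (m-1))) = d :: r' := by rw [hdq, hr]
    have hcolq : (pvCol board (pvRes board.length (m-1)))[pvFirst board (pvRes board.length (m-1)) p]'(by rw [pvCol_length]; exact hqlt) = d := by
      have h5 := List.getElem_drop (xs := pvCol board (pvRes board.length (m-1)))
        (i := pvFirst board (pvRes board.length (m-1)) p) (j := 0) (h := by rw [hdqr]; simp)
      simp only [hdqr] at h5
      simpa using h5.symm
    have hcell := pvCell board hge (m-1) hc1 hc2 hc0 (pvFirst board (pvRes board.length (m-1)) p) hqlt [] 0
    have hdoll : PySem.List.pyGetD (PySem.List.pyGetD board ((pvFirst board (pvRes board.length (m-1)) p : Nat) : Int) []) (m-1) 0 = d := hcell.trans hcolq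
    rw [hdoll, List.filter_cons, if_pos hdnz]
    dsimp only
    rw [if_pos (show ((pvFirst board (pvRes board.length (m-1)) p : Nat) : Int) < (board.length:Int) by exact_mod_cast hqlt)]
    rw [pvSet_eq stA.1 (m-1) _ (by rw [hlA]; omega) (by rw [hlA]; exact_mod_cast hc2), hresA]
    rw [pvSet_eq _ (m-1) _ (by rw [hlB2]; omega) (by rw [hlB2]; exact_mod_cast hc2), hresB]
    rw [List.set_set]
    have hb1 : stA.2.1 = stB.2.1 := by rw [hbk]
    have hb2 : stA.2.2 = stB.2.2 := by rw [hbk]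
    rw [hb1, hb2]
    have hcolinv : ∀ j', j' < board.length →
        ∃ p' : Nat, p' ≤ board.length ∧
          (stB.1.set (pvRes board.length (m-1)) (((pvFirst board (pvRes board.length (m-1)) p : Nat) : Int) + 1)).getD j' 0 = (p' : Int) ∧
          (stA.1.set (pvRes board.length (m-1)) (List.filter pvNZ r')).getD j' []
            = ((pvCol board j').drop p').filter pvNZ := by
      intro j' hj'
      by_cases hjj : j' = pvRes board.length (m-1)
      · subst hjj
        refine ⟨pvFirst board (pvRes board.length (m-1)) p + 1, by omega, ?_, ?_⟩
        · rw [pvGetDSetSelf _ _ _ _ (by rw [hlB]; exact hj)]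
          push_cast; ring
        · rw [pvGetDSetSelf _ _ _ _ (by rw [hlA]; exact hj)]
          rw [← List.drop_drop, hdqr]
          simp
      · obtain ⟨p', hp'1, hp'2, hp'3⟩ := hcols j' hj'
        exact ⟨p', hp'1, by rw [pvGetDSetNe _ _ _ _ _ (fun h => hjj h.symm)]; exact hp'2,
          by rw [pvGetDSetNe _ _ _ _ _ (fun h => hjj h.symm)]; exact hp'3⟩
    split_ifs with hbasket
    · exact ⟨rfl, by simp [hlA], by simp [hlB], hcolinv⟩
    · exact ⟨rfl, by simp [hlA], by simp [hlB], hcolinv⟩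

lemma pvFold (board : List (List Int)) (hge : ∀ row ∈ board, board.length ≤ row.length) :
    ∀ (moves : List Int) (stA : List (List Int) × List Int × Int) (stB : List Int × List Int × Int),
      (∀ m ∈ moves, (1 - (board.length:Int) ≤ m ∧ m ≤ (board.length:Int)) ∧
        (0 ≤ m - 1 ∨ ∀ row ∈ board, row.length = board.length)) →
      pvInv board stA stB →
      pvInv board (moves.foldl solutionStepA stA)
        (moves.foldl (solutionStepB board (board.length:Int)) stB)
  | [], _, _, _, h => h
  | m :: rest, stA, stB, hmv, h => by
    simp only [List.foldl_cons]
    exact pvFold board hge rest _ _ (fun x hx => hmv x (List.mem_cons_of_mem _ hx))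
      (pvStep board hge m (hmv m (by simp)).1.1 (hmv m (by simp)).1.2 (hmv m (by simp)).2 _ _ h)

lemma pvInner (l : List (List Int)) (j : Nat) (acc : List Int) :
    l.foldl (fun acc row => if PySem.List.pyGetD row (j:Int) 0 ≠ 0 then
        acc ++ [PySem.List.pyGetD row (j:Int) 0] else acc) acc
      = acc ++ (l.map (fun row => row.getD j 0)).filter pvNZ := by
  induction l generalizing acc with
  | nil => simp
  | cons r t ih =>
    simp only [List.foldl_cons, List.map_cons, List.filter_cons, PySem.List.pyGetD_natCast]
    simp only [PySem.List.pyGetD_natCast] at ih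
    by_cases h : r.getD j 0 = 0
    · rw [if_neg (by simpa using h), ih, if_neg (by simp only [List.getD] at h; simp [pvNZ, h])]
    · rw [if_pos (by simpa using h), ih, if_pos (by simp only [List.getD] at h; simp [pvNZ, h])]
      simp

lemma pvBuild (board : List (List Int)) (j : Nat) :
    (PySem.List.pyRange 0 (board.length:Int) 1).foldl (fun col i =>
        if PySem.List.pyGetD (PySem.List.pyGetD board i []) (j:Int) 0 ≠ 0 then
          col ++ [PySem.List.pyGetD (PySem.List.pyGetD board i []) (j:Int) 0]
        else col) []
      = (pvCol board j).filter pvNZ := by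
  rw [PySem.List.foldl_pyRange_zero_pyGetD' board [] (fun acc row =>
    if PySem.List.pyGetD row (j:Int) 0 ≠ 0 then acc ++ [PySem.List.pyGetD row (j:Int) 0] else acc) []]
  rw [pvInner board j []]
  rfl

lemma pvInit (board : List (List Int)) :
    pvInv board
      ((PySem.List.pyRange 0 (board.length:Int) 1).map (fun j =>
        (PySem.List.pyRange 0 (board.length:Int) 1).foldl (fun col i =>
          if PySem.List.pyGetD (PySem.List.pyGetD board i []) j 0 ≠ 0 then
            col ++ [PySem.List.pyGetD (PySem.List.pyGetD board i []) j 0]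
          else col) []), [], 0)
      (List.replicate board.length (0:Int), [], 0) := by
  refine ⟨rfl, ?_, by simp, ?_⟩
  · simp [PySem.List.pyRange_one]
  · intro j hj
    refine ⟨0, by omega, ?_, ?_⟩
    · rw [List.getD_eq_getElem _ _ (by simp [hj]), List.getElem_replicate]
      simp
    · rw [List.getD_eq_getElem _ _ (by simp [PySem.List.pyRange_one]; omega)]
      rw [List.getElem_map]
      rw [PySem.List.getElem_pyRange_one]
      rw [zero_add]
      rw [pvBuild board j, List.drop_zero]

lemma pvMain (board : List (List Int)) (moves : List Int)
    (hge : ∀ row ∈ board, board.length ≤ row.length)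
    (hmv : ∀ m ∈ moves, 1 - (board.length : Int) ≤ m ∧ m ≤ (board.length : Int))
    (hsp : (∀ row ∈ board, row.length = board.length) ∨ (∀ m ∈ moves, 1 ≤ m)) :
    solution board moves = solution_alt board moves := by
  unfold solution solution_alt
  have h := pvFold board hge moves _ _
    (fun m hm => ⟨hmv m hm, by rcases hsp with h | h
                               · exact Or.inr h
                               · exact Or.inl (by have := h m hm; omega)⟩)
    (pvInit board)
  exact congrArg Prod.snd h.1

-- ===== VERDICT (by name: the statement is the Claim_ definition above) =====
theorem solution_spec : Claim_equal_solution := by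
  intro board moves _ hpre
  unfold Spec_solution
  exact pvMain board moves hpre.1 hpre.2.1 hpre.2.2
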